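-- pv_equiv track=rewrite | github.com/Jdelbarcogarza/NewScriptureCompiler | NewScripture.py | substitute_patterns
-- ===== SOURCE A (Python) =====
-- def substitute_patterns(input_string, patterns):
--     result_lines = []
--     for line in input_string.splitlines(): #Itera sobre cada linea de los string del archivo
--         for pattern_name, pattern_data in patterns.items(): #Itera sobre cada patron en los diccionarios de los patrones por eso el .items()
--             if pattern_name in line:
--                 #Remplaza pattern_name con pattern_data y manda lo remplazado a la lista
--                 replaced_line = line.replace(pattern_name, f"{' '.join(pattern_data)}")
--                 result_lines.append(replaced_line)
--                 break
--         else: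
--             result_lines.append(line) #Manda las lineas resultantes a la lista
--     s = str('\n'.join(result_lines))
--     return s
-- ===== SOURCE B (Python) =====
-- def substitute_patterns(input_string, patterns):
--     # Pattern-major rewrite: one pass over the lines per pattern; a line is a
--     # (done, text) cell and is never rescanned once a pattern matched it; the
--     # join of each pattern's data is computed once, not per line.
--     cells = [(False, line) for line in input_string.splitlines()]
--     for pattern_name, pattern_data in patterns.items():
--         joined = ' '.join(pattern_data)
--         cells = [(True, line.replace(pattern_name, joined))
--                  if (not done and pattern_name in line) else (done, line)
--                  for done, line in cells]
--     return '\n'.join(line for _, line in cells)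
-- ===== Notes on version B (the rewrite author's own statement) =====
-- stated objective: alternative
-- what changed: Loop order inverted: instead of scanning the pattern dict per line with a for/else-break, B makes one pass over the lines per pattern, carrying a done-flag per line so matched lines are skipped, and joins each pattern's data once instead of at every match.
import Mathlib
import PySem

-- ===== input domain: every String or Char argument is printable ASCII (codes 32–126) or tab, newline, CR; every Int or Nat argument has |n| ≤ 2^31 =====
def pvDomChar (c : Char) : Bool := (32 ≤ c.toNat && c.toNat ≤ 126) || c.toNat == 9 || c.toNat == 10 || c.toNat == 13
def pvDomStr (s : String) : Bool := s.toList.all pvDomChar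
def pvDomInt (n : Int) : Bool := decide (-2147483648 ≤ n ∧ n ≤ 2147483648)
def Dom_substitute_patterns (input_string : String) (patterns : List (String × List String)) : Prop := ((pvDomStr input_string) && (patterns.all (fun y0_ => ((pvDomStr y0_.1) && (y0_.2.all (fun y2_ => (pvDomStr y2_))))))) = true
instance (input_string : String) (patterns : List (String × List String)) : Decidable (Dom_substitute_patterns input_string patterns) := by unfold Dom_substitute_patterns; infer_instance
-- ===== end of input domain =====

-- B inverts A's loop order (pattern-major single pass over done-flagged line cells,
-- join computed once per pattern) — objective: alternative, same asymptotic cost.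

-- ===== PORT A =====
-- A's inner 'for pattern in patterns.items(): … break / else: append(line)' loop for one line
def pvInnerA (line : String) : List (String × List String) → String
  | [] => line
  | (pattern_name, pattern_data) :: ps =>
      if PySem.Str.isIn pattern_name line then
        PySem.Str.replace line pattern_name (PySem.Str.join " " pattern_data)
      else pvInnerA line ps

def substitute_patterns (input_string : String) (patterns : List (String × List String)) : String :=
  let result_lines := (PySem.Str.splitlines input_string).foldl
    (fun acc line => acc ++ [pvInnerA line patterns]) []
  PySem.Str.join "\n" result_lines

-- ===== PORT B =====
def substitute_patterns_alt (input_string : String) (patterns : List (String × List String)) : String :=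
  let cells := (PySem.Str.splitlines input_string).map (fun line => (false, line))
  let cells := patterns.foldl
    (fun cs p =>
      let joined := PySem.Str.join " " p.2
      cs.map (fun c =>
        if !c.1 && PySem.Str.isIn p.1 c.2 then (true, PySem.Str.replace c.2 p.1 joined) else c))
    cells
  PySem.Str.join "\n" (cells.map (·.2))

-- ===== PRECONDITION & SPEC =====
def Spec_substitute_patterns (input_string : String) (patterns : List (String × List String)) (out : String) : Prop := out = substitute_patterns_alt input_string patterns
instance (input_string : String) (patterns : List (String × List String)) (out : String) : Decidable (Spec_substitute_patterns input_string patterns out) := by unfold Spec_substitute_patterns; infer_instance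

-- ===== CLAIM (what is proved, stated in full; the proofs are below) =====
def Claim_equal_substitute_patterns : Prop := ∀ (input_string : String) (patterns : List (String × List String)), Dom_substitute_patterns input_string patterns → Spec_substitute_patterns input_string patterns (substitute_patterns input_string patterns)

-- ===== LEMMAS AND PROOFS =====

-- B's per-pattern step on one cell
def pvStepB (c : Bool × String) (p : String × List String) : Bool × String :=
  if !c.1 && PySem.Str.isIn p.1 c.2 then (true, PySem.Str.replace c.2 p.1 (PySem.Str.join " " p.2)) else c

-- a done cell is fixed by every later pattern
theorem pvStepB_done (x : String) (ps : List (String × List String)) :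
    ps.foldl pvStepB (true, x) = (true, x) := by
  induction ps with
  | nil => rfl
  | cons p ps ih => simpa [pvStepB] using ih

-- B's fold over the patterns on one fresh cell computes A's inner loop
theorem pvCell_eq_innerA (line : String) (ps : List (String × List String)) :
    (ps.foldl pvStepB (false, line)).2 = pvInnerA line ps := by
  induction ps with
  | nil => rfl
  | cons p ps ih =>
      by_cases h : PySem.Chars.isIn p.1.toList line.toList
      · simp [List.foldl_cons, pvStepB, h, pvStepB_done, pvInnerA]
      · simpa [List.foldl_cons, pvStepB, h, pvInnerA] using ih

-- a fold of per-element maps is a map of per-cell folds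
theorem pvFoldl_map_comm {α β : Type} (g : β → α → α) (ps : List β) (cs : List α) :
    ps.foldl (fun cs p => cs.map (fun c => g p c)) cs
      = cs.map (fun c => ps.foldl (fun c p => g p c) c) := by
  induction ps generalizing cs with
  | nil => simp
  | cons p ps ih => simp [List.foldl_cons, ih, List.map_map, Function.comp_def]

-- ===== VERDICT (by name: the statement is the Claim_ definition above) =====
theorem substitute_patterns_spec : Claim_equal_substitute_patterns := by
  intro input_string patterns _
  unfold Spec_substitute_patterns substitute_patterns substitute_patterns_alt
  rw [PySem.List.foldl_append_singleton_eq_map]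
  have hstep : (fun (cs : List (Bool × String)) (p : String × List String) =>
      let joined := PySem.Str.join " " p.2
      cs.map (fun c => if !c.1 && PySem.Str.isIn p.1 c.2
        then (true, PySem.Str.replace c.2 p.1 joined) else c))
      = fun cs p => cs.map (fun c => pvStepB c p) := by
    funext cs p; rfl
  simp only [hstep, pvFoldl_map_comm (fun p c => pvStepB c p), List.map_map,
    Function.comp_def, pvCell_eq_innerA, List.nil_append]
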